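-- pv_equiv track=rewrite | github.com/Imsunwoo-hub/- | programmers/Solution_짝지어제거하기.py | solution
-- ===== SOURCE A (Python) =====
-- def solution(s):
--     answer = 0
--     temp = []
--     temp.append(s[0])
--     for i in range(1, len(s)) :
--         if len(temp) == 0 or temp[-1] != s[i] :
--             temp.append(s[i])
--         elif temp[-1] == s[i] :
--             del temp[len(temp)-1]
--
--     if len(temp) == 0 :
--         answer = 1
--
--     return answer
-- ===== SOURCE B (Python) =====
-- def solution(s):
--     # Repeated-reduction: each pass deletes every (non-overlapping, leftmost-first)
--     # adjacent equal pair; loop until a pass changes nothing.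
--     t = s
--     while True:
--         u = []
--         i = 0
--         while i < len(t):
--             if i + 1 < len(t) and t[i] == t[i + 1]:
--                 i += 2
--             else:
--                 u.append(t[i])
--                 i += 1
--         u = ''.join(u)
--         if u == t:
--             return 1 if t == '' else 0
--         t = u
-- ===== Notes on version B (the rewrite author's own statement) =====
-- stated objective: alternative
-- what changed: Replaces the single push/pop stack pass with a repeated-reduction loop that rescans the string, deleting all adjacent equal pairs each pass until a fixpoint is reached.
import Mathlib
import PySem

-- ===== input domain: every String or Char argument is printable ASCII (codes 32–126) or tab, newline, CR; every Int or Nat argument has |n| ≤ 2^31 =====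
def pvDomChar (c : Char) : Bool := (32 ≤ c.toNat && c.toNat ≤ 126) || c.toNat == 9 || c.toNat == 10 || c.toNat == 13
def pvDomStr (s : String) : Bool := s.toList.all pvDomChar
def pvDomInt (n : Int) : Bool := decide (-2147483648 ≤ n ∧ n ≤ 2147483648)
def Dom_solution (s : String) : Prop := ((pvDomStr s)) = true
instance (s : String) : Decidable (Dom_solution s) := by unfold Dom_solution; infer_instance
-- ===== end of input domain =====

-- B replaces A's one-pass push/pop stack with a repeated-reduction loop (rescan, delete all
-- adjacent equal pairs, repeat until a fixpoint); a different algorithm, not claimed faster.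


-- ===== PORT A =====
-- one loop step of A: 'if len(temp)==0 or temp[-1] != s[i]: append  elif temp[-1]==s[i]: del last'
-- (temp[-1] is only read when temp is nonempty, where it equals getLast?; exact)
def stepA (temp : List Char) (c : Char) : List Char :=
  if temp.length = 0 ∨ temp.getLast? ≠ some c then temp ++ [c] else temp.dropLast

def solution (s : String) : Int :=
  match (s.toList)[0]? with
  | none => 0   -- Python raises IndexError on s[0] here; excluded by Pre_solution
  | some c0 =>
    let temp := (List.drop 1 s.toList).foldl stepA [c0]   -- for i in range(1, len(s))
    if temp.length = 0 then 1 else 0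

-- ===== PORT B =====
-- one rescan pass of Source B's inner while-loop: skip both chars of an adjacent equal pair,
-- otherwise keep the current char and advance by one
def passB : List Char → List Char
  | a :: b :: t => if a = b then passB t else a :: passB (b :: t)
  | l => l

-- needed by loopB's termination proof (cited in decreasing_by)
theorem passB_length_le (t : List Char) : (passB t).length ≤ t.length := by
  fun_induction passB t with
  | case1 b t ih => simp; omega
  | case2 a b t h ih => simp at ih ⊢; omega
  | case3 l hx => exact le_refl _

theorem passB_length_lt (t : List Char) (h : passB t ≠ t) : (passB t).length < t.length := by
  fun_induction passB t with
  | case1 b t ih => have := passB_length_le t; simp; omega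
  | case2 a b t hab ih =>
    have hne : passB (b :: t) ≠ b :: t := fun hc => h (by rw [hc])
    have := ih hne
    simp at this ⊢; omega
  | case3 l hx => exact absurd rfl h

-- Source B's outer while-loop: apply passB until nothing changes
def loopB (t : List Char) : List Char :=
  let u := passB t
  if _h : u = t then t else loopB u
termination_by t.length
decreasing_by exact passB_length_lt t ‹_›

def solution_alt (s : String) : Int :=
  if loopB s.toList = [] then 1 else 0

-- ===== PRECONDITION & SPEC =====
-- Pre_ excludes only the empty string, on which A raises IndexError (unconditional s[0]).
def Pre_solution (s : String) : Prop := s ≠ ""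
instance (s : String) : Decidable (Pre_solution s) := by unfold Pre_solution; infer_instance
def pvWitness_solution : String := "baab"

def Spec_solution (s : String) (out : Int) : Prop := out = solution_alt s
instance (s : String) (out : Int) : Decidable (Spec_solution s out) := by unfold Spec_solution; infer_instance

-- ===== CLAIM (what is proved, stated in full; the proofs are below) =====
def Claim_equal_solution : Prop := ∀ (s : String), Dom_solution s → Pre_solution s → Spec_solution s (solution s)

-- ===== LEMMAS AND PROOFS =====

-- reference cons-stack automaton (proof device relating the two ports)
def stepR (S : List Char) (c : Char) : List Char :=
  if S.head? = some c then S.tail else c :: S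

def run : List Char → List Char → List Char
  | S, [] => S
  | S, c :: t => run (stepR S c) t

theorem stepA_eq_stepR (temp : List Char) (c : Char) :
    stepA temp c = (stepR temp.reverse c).reverse := by
  unfold stepA stepR
  cases h : temp.reverse with
  | nil =>
    have : temp = [] := by simpa using congrArg List.reverse h
    subst this; simp
  | cons a S' =>
    have hlast : temp.getLast? = some a := by rw [← List.head?_reverse, h]; rfl
    have hne : temp ≠ [] := by
      intro hc; rw [hc] at h; simp at h
    have htemp : temp = S'.reverse ++ [a] := by simpa using congrArg List.reverse h
    by_cases hac : a = c
    · subst hac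
      have hd : temp.dropLast = temp.reverse.tail.reverse := by simp
      simp [hlast, hd, h, List.length_eq_zero_iff, hne]
    · have hcond : temp.getLast? ≠ some c := by simp [hlast, hac]
      rw [if_pos (Or.inr hcond), if_neg (by simp [hac]), htemp]
      simp

theorem foldA_eq_run (rest temp : List Char) :
    rest.foldl stepA temp = (run temp.reverse rest).reverse := by
  induction rest generalizing temp with
  | nil => simp [run]
  | cons c t ih =>
    simp only [List.foldl_cons, run, ih, stepA_eq_stepR, List.reverse_reverse]

theorem stepR_chain (S : List Char) (c : Char) (h : S.IsChain (· ≠ ·)) :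
    (stepR S c).IsChain (· ≠ ·) := by
  unfold stepR
  cases S with
  | nil => simp
  | cons a S' =>
    by_cases hac : a = c
    · subst hac; simpa using h.tail
    · rw [if_neg (by simpa using hac)]
      exact List.isChain_cons_cons.mpr ⟨Ne.symm hac, h⟩

theorem run_pair (S : List Char) (a : Char) (t : List Char) (h : S.IsChain (· ≠ ·)) :
    run S (a :: a :: t) = run S t := by
  have key : stepR (stepR S a) a = S := by
    unfold stepR
    cases S with
    | nil => simp
    | cons b S' =>
      by_cases hba : b = a
      · subst hba
        cases S' with
        | nil => simp
        | cons d S'' =>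
          have hbd : b ≠ d := (List.isChain_cons_cons.mp h).1
          simp [Ne.symm hbd]
      · simp [hba]
  show run (stepR (stepR S a) a) t = run S t
  rw [key]

theorem run_passB (t : List Char) : ∀ S, S.IsChain (· ≠ ·) → run S (passB t) = run S t := by
  fun_induction passB t with
  | case1 b t ih =>
    intro S hS
    rw [ih S hS, run_pair S b t hS]
  | case2 a b t hab ih =>
    intro S hS
    show run (stepR S a) (passB (b :: t)) = run (stepR S a) (b :: t)
    exact ih _ (stepR_chain S a hS)
  | case3 l hx => intro S _; rfl

theorem passB_fix_chain (t : List Char) (h : passB t = t) : t.IsChain (· ≠ ·) := by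
  fun_induction passB t with
  | case1 b t ih =>
    exfalso
    have h1 := passB_length_le t
    have h2 : (passB t).length = t.length + 2 := by rw [h]; simp
    omega
  | case2 a b t hab ih =>
    simp only [List.cons.injEq, true_and] at h
    exact List.isChain_cons_cons.mpr ⟨hab, ih h⟩
  | case3 l hx =>
    match l, hx with
    | [], _ => simp
    | [a], _ => simp
    | a :: b :: t, hx => exact absurd rfl (hx a b t)

theorem run_loopB (t : List Char) : run [] (loopB t) = run [] t := by
  fun_induction loopB t with
  | case1 t u hfix => rfl
  | case2 t u hfix ih => rw [ih, run_passB t [] (by simp)]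

theorem loopB_fix (t : List Char) : passB (loopB t) = loopB t := by
  fun_induction loopB t with
  | case1 t u hfix => exact hfix
  | case2 t u hfix ih => exact ih

theorem run_chain_reduced (t : List Char) (hc : t.IsChain (· ≠ ·)) :
    ∀ S, (∀ a, t.head? = some a → S.head? ≠ some a) → run S t = t.reverse ++ S := by
  induction t with
  | nil => intro S _; rfl
  | cons c t' ih =>
    intro S hS
    have hpush : stepR S c = c :: S := by
      unfold stepR
      rw [if_neg (hS c rfl)]
    show run (stepR S c) t' = (c :: t').reverse ++ S
    rw [hpush, ih hc.tail (c :: S) ?_]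
    · simp
    · intro a ha
      have hca : c ≠ a := by
        cases t' with
        | nil => simp at ha
        | cons d t'' =>
          simp only [List.head?_cons, Option.some.injEq] at ha
          subst ha
          exact (List.isChain_cons_cons.mp hc).1
      simp [hca]

theorem loopB_empty_iff (t : List Char) : loopB t = [] ↔ run [] t = [] := by
  constructor
  · intro h
    rw [← run_loopB t, h]; rfl
  · intro h
    have hchain := passB_fix_chain _ (loopB_fix t)
    have hred := run_chain_reduced (loopB t) hchain [] (by simp)
    rw [run_loopB t, h] at hred
    simpa using congrArg List.reverse hred.symm

theorem key_iff (c0 : Char) (rest : List Char) :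
    rest.foldl stepA [c0] = [] ↔ loopB (c0 :: rest) = [] := by
  rw [foldA_eq_run, List.reverse_eq_nil_iff, loopB_empty_iff]
  have h0 : run [] (c0 :: rest) = run [c0] rest := by
    show run (stepR [] c0) rest = _
    simp [stepR]
  rw [h0]
  simp

-- ===== VERDICT (by name: the statement is the Claim_ definition above) =====
theorem solution_spec : Claim_equal_solution := by
  intro s _ hpre
  unfold Spec_solution
  cases hl : s.toList with
  | nil =>
    exact absurd (by cases s; simp_all) hpre
  | cons c0 rest =>
    have hA : solution s = if rest.foldl stepA [c0] = [] then 1 else 0 := by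
      unfold solution
      rw [hl]
      simp [List.length_eq_zero_iff]
    have hB : solution_alt s = if loopB (c0 :: rest) = [] then 1 else 0 := by
      unfold solution_alt
      rw [hl]
    rw [hA, hB]
    simp only [key_iff c0 rest]
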